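-- pv_equiv track=rewrite | github.com/knyttstory/HoSIM | detect_community.py | find_seeds_sets
-- ===== SOURCE A (Python) =====
-- def find_seeds_sets(query_node, node_importances):
--     bigger_nodes = list()
--     for ni in node_importances:
--         if ni[0] != query_node:
--             bigger_nodes.append(ni[0])
--         else:
--             return bigger_nodes
--     return bigger_nodes
-- ===== SOURCE B (Python) =====
-- def find_seeds_sets(query_node, node_importances):
--     keys = [ni[0] for ni in node_importances]
--     if query_node in keys:
--         return keys[:keys.index(query_node)]
--     return keys
-- ===== Notes on version B (the rewrite author's own statement) =====
-- stated objective: alternative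
-- what changed: Replaces A's fused scan with early return by two passes: build the full key list, then locate query_node by membership+index and slice the prefix.
import Mathlib
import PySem

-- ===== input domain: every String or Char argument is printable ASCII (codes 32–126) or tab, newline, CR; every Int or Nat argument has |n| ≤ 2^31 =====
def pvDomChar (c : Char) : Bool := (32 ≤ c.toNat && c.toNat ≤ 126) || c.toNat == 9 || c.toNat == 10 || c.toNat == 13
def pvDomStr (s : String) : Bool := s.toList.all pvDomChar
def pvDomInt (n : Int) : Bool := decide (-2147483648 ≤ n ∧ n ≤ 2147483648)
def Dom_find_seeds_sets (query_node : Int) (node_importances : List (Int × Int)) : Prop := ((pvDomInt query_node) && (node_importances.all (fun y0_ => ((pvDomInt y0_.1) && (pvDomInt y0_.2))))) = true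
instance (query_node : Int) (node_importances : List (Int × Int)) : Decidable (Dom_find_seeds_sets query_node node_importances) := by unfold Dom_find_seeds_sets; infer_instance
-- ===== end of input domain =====

-- ===== PORT A =====
-- B builds the full key list, then locates query_node and slices the prefix (two passes) instead of A's fused scan with early return.
def find_seeds_sets_A_loop (query_node : Int) (nis : List (Int × Int)) (acc : List Int) : List Int :=
  match nis with
  | [] => acc
  | ni :: rest =>
    if ni.1 != query_node then find_seeds_sets_A_loop query_node rest (acc ++ [ni.1])
    else acc

def find_seeds_sets (query_node : Int) (node_importances : List (Int × Int)) : List Int :=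
  find_seeds_sets_A_loop query_node node_importances []

-- ===== PORT B =====
def find_seeds_sets_alt (query_node : Int) (node_importances : List (Int × Int)) : List Int :=
  let keys := node_importances.map (·.1)
  if keys.contains query_node then
    match PySem.List.index? keys query_node with
    | some i => PySem.List.slice keys none (some (i : Int))  -- keys[:keys.index(query_node)]
    | none => keys
  else keys

-- ===== PRECONDITION & SPEC =====
def Spec_find_seeds_sets (query_node : Int) (node_importances : List (Int × Int)) (out : List Int) : Prop := out = find_seeds_sets_alt query_node node_importances
instance (query_node : Int) (node_importances : List (Int × Int)) (out : List Int) : Decidable (Spec_find_seeds_sets query_node node_importances out) := by unfold Spec_find_seeds_sets; infer_instance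

-- ===== CLAIM (what is proved, stated in full; the proofs are below) =====
def Claim_equal_find_seeds_sets : Prop := ∀ (query_node : Int) (node_importances : List (Int × Int)), Dom_find_seeds_sets query_node node_importances → Spec_find_seeds_sets query_node node_importances (find_seeds_sets query_node node_importances)

-- ===== LEMMAS AND PROOFS =====

-- ===== VERDICT (by name: the statement is the Claim_ definition above) =====

theorem altA_eq (query_node : Int) (nis : List (Int × Int)) (acc : List Int) :
    find_seeds_sets_A_loop query_node nis acc = acc ++ find_seeds_sets_alt query_node nis := by
  induction nis generalizing acc with
  | nil => simp [find_seeds_sets_A_loop, find_seeds_sets_alt]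
  | cons hd tl ih =>
    by_cases h : hd.1 = query_node
    · have hk : PySem.List.index? (query_node :: tl.map (·.1)) query_node = some 0 :=
        PySem.List.index?_cons_self _ _
      simp only [find_seeds_sets_A_loop, find_seeds_sets_alt, h, bne_self_eq_false,
        Bool.false_eq_true, if_false, List.map_cons, List.contains_cons, BEq.refl,
        Bool.true_or, if_true, hk]
      rw [show ((0 : ℕ) : Int) = ((0 : ℕ) : Int) from rfl, PySem.List.slice_to_natCast]
      simp
    · have hne : query_node ≠ hd.1 := fun e => h e.symm
      simp only [find_seeds_sets_A_loop, bne_iff_ne, ne_eq, h, not_false_eq_true, if_true]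
      rw [ih]
      simp only [find_seeds_sets_alt, List.map_cons, List.contains_cons]
      by_cases hm : query_node ∈ tl.map (·.1)
      · have : PySem.List.index? (tl.map (·.1)) query_node ≠ none := by
          simp only [ne_eq, PySem.List.index?_eq_none_iff]; simpa using hm
        obtain ⟨i, hi⟩ := Option.ne_none_iff_exists'.mp this
        have hq : (query_node == hd.1) = false := by simpa using hne
        simp only [hi, PySem.List.index?_cons_of_ne _ h, Option.map_some, hq]
        rw [PySem.List.slice_to_natCast, PySem.List.slice_to_natCast]
        simp [hm, List.append_assoc]
      · have hq : (query_node == hd.1) = false := by simpa using hne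
        simp [hm, hq, List.append_assoc]

theorem find_seeds_sets_spec : Claim_equal_find_seeds_sets := by
  intro q nis _
  unfold Spec_find_seeds_sets find_seeds_sets
  rw [altA_eq]; simp
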